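-- pv_equiv track=rewrite | github.com/RTroshin/Codewars | Python/7 kyu/Make Equal.py | count
-- ===== SOURCE A (Python) =====
-- def count(a, t, x):
--     count = 0
--
--     for i in range(len(a)):
--         nAdd = nSub = a[i]
--         if a[i] <= t:
--             while nAdd < t:
--                 nAdd += x
--                 if nAdd == t:
--                     count += 1
--                     break
--         else:
--             while nSub > t:
--                 nSub -= x
--                 if nSub == t:
--                     count += 1
--                     break
--
--     return count
-- ===== SOURCE B (Python) =====
-- def count(a, t, x):
--     # Direct divisibility test instead of simulating +/- x steps element by element.
--     return sum(1 for v in a if v != t and (t - v) % x == 0)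
-- ===== Notes on version B (the rewrite author's own statement) =====
-- stated objective: faster
-- what changed: Replaces the per-element while-loop simulation of repeated +/- x steps by a single-pass divisibility test (v != t and (t - v) % x == 0); intended as faster (O(n) vs O(n*steps)); a timing run measured 1.71x at its largest size.
-- outside the precondition, e.g. on count([7, 7], 7, 0): A returns 0, B returns 0; on count([7], 7, -3): A returns 0, B returns 0
import Mathlib
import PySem

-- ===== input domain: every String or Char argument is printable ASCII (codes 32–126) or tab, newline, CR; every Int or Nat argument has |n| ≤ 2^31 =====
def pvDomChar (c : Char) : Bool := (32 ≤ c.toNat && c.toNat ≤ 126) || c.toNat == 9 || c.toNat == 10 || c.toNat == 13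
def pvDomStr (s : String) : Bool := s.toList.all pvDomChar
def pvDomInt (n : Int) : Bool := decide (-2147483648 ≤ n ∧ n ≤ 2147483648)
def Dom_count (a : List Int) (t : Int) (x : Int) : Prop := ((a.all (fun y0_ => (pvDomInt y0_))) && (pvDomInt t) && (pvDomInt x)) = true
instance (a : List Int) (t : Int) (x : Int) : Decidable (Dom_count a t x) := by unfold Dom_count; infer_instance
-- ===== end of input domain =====

-- B replaces A's per-element step-by-step simulation (repeatedly adding or
-- subtracting x until t is reached or passed) by a one-pass divisibility test;
-- intended as faster (no inner loop); a timing run measured 1.71x at its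
-- largest size.

-- ===== PORT A =====
-- while nAdd < t: nAdd += x; if nAdd == t: count += 1; break
-- fuel = (t - nAdd).toNat bounds the iteration count whenever x > 0 (Pre_);
-- the fuel is exact there, so the port computes A's loop step for step.
def countWhileAdd (fuel : Nat) (n t x : Int) : Bool :=
  match fuel with
  | 0 => false
  | f + 1 =>
    if n < t then
      let n' := n + x
      if n' = t then true else countWhileAdd f n' t x
    else false

-- while nSub > t: nSub -= x; if nSub == t: count += 1; break
def countWhileSub (fuel : Nat) (n t x : Int) : Bool :=
  match fuel with
  | 0 => false
  | f + 1 =>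
    if n > t then
      let n' := n - x
      if n' = t then true else countWhileSub f n' t x
    else false

def count (a : List Int) (t : Int) (x : Int) : Int :=
  a.foldl
    (fun c v =>
      if v ≤ t then
        (if countWhileAdd (t - v).toNat v t x then c + 1 else c)
      else
        (if countWhileSub (v - t).toNat v t x then c + 1 else c))
    0

-- ===== PORT B =====
-- sum(1 for v in a if v != t and (t - v) % x == 0)
def count_alt (a : List Int) (t : Int) (x : Int) : Int :=
  ((a.filter (fun v => decide (v ≠ t) && decide (PySem.Int.mod (t - v) x = 0))).length : Int)

-- ===== PRECONDITION & SPEC =====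
-- Pre_ excludes x ≤ 0: there A's while loops diverge as soon as some element
-- differs from t; A returns (0) only when every element equals t, and B agrees
-- (returns 0) on those inputs.
def Pre_count (_a : List Int) (_t : Int) (x : Int) : Prop := 0 < x
instance (a : List Int) (t : Int) (x : Int) : Decidable (Pre_count a t x) := by
  unfold Pre_count; infer_instance

def pvWitness_count : List Int × Int × Int := ([1, 3, 7, 7], 7, 2)

def Spec_count (a : List Int) (t : Int) (x : Int) (out : Int) : Prop := out = count_alt a t x
instance (a : List Int) (t : Int) (x : Int) (out : Int) : Decidable (Spec_count a t x out) := by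
  unfold Spec_count; infer_instance

-- ===== CLAIM (what is proved, stated in full; the proofs are below) =====
def Claim_equal_count : Prop := ∀ (a : List Int) (t : Int) (x : Int), Dom_count a t x → Pre_count a t x → Spec_count a t x (count a t x)

-- ===== LEMMAS AND PROOFS =====

-- The "add" loop succeeds exactly when v < t and x divides t - v.
theorem countWhileAdd_iff (fuel : Nat) (n t x : Int) (hx : 0 < x)
    (hf : t - n ≤ (fuel : Int)) :
    countWhileAdd fuel n t x = true ↔ (n < t ∧ x ∣ (t - n)) := by
  induction fuel generalizing n with
  | zero =>
    simp only [countWhileAdd]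
    constructor
    · intro h; exact absurd h (by decide)
    · rintro ⟨h, -⟩; exfalso; omega
  | succ f ih =>
    simp only [countWhileAdd]
    by_cases hn : n < t
    · by_cases heq : n + x = t
      · rw [if_pos hn, if_pos heq]
        constructor
        · intro _; exact ⟨hn, ⟨1, by omega⟩⟩
        · intro _; rfl
      · rw [if_pos hn, if_neg heq]
        rw [ih (n + x) (by omega)]
        constructor
        · rintro ⟨-, k, hk⟩
          exact ⟨hn, ⟨k + 1, by linarith⟩⟩
        · rintro ⟨-, k, hk⟩
          have hk1 : 1 ≤ k := by nlinarith
          have hk2 : k ≠ 1 := by rintro rfl; omega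
          have hk3 : 2 ≤ k := by omega
          exact ⟨by nlinarith, ⟨k - 1, by linarith⟩⟩
    · rw [if_neg hn]
      constructor
      · intro h; exact absurd h (by decide)
      · rintro ⟨h, -⟩; exact absurd h hn
-- The "sub" loop succeeds exactly when v > t and x divides v - t.
theorem countWhileSub_iff (fuel : Nat) (n t x : Int) (hx : 0 < x)
    (hf : n - t ≤ (fuel : Int)) :
    countWhileSub fuel n t x = true ↔ (t < n ∧ x ∣ (n - t)) := by
  induction fuel generalizing n with
  | zero =>
    simp only [countWhileSub]
    constructor
    · intro h; exact absurd h (by decide)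
    · rintro ⟨h, -⟩; exfalso; omega
  | succ f ih =>
    simp only [countWhileSub]
    by_cases hn : t < n
    · by_cases heq : n - x = t
      · rw [if_pos hn, if_pos heq]
        constructor
        · intro _; exact ⟨hn, ⟨1, by omega⟩⟩
        · intro _; rfl
      · rw [if_pos hn, if_neg heq]
        rw [ih (n - x) (by omega)]
        constructor
        · rintro ⟨-, k, hk⟩
          exact ⟨hn, ⟨k + 1, by linarith⟩⟩
        · rintro ⟨-, k, hk⟩
          have hk1 : 1 ≤ k := by nlinarith
          have hk2 : k ≠ 1 := by rintro rfl; omega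
          have hk3 : 2 ≤ k := by omega
          exact ⟨by nlinarith, ⟨k - 1, by linarith⟩⟩
    · rw [if_neg hn]
      constructor
      · intro h; exact absurd h (by decide)
      · rintro ⟨h, -⟩; exact absurd h hn

-- Per-element agreement: A's loop-based test equals B's divisibility test.
theorem elem_test_eq (t x v : Int) (hx : 0 < x) :
    (if v ≤ t then (if countWhileAdd (t - v).toNat v t x then (1 : Int) else 0)
     else (if countWhileSub (v - t).toNat v t x then (1 : Int) else 0))
    = (if (decide (v ≠ t) && decide (PySem.Int.mod (t - v) x = 0)) then (1 : Int) else 0) := by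
  by_cases hvt : v ≤ t
  · rcases eq_or_lt_of_le hvt with rfl | hlt
    · simp [countWhileAdd]
    · have hA := countWhileAdd_iff (t - v).toNat v t x hx (by omega)
      have hdvd : PySem.Int.mod (t - v) x = 0 ↔ x ∣ (t - v) :=
        PySem.Int.mod_eq_zero_iff_dvd _ _
      by_cases hd : x ∣ (t - v)
      · have hT : countWhileAdd (t - v).toNat v t x = true := hA.mpr ⟨hlt, hd⟩
        simp [hvt, hT, hdvd.mpr hd, show v ≠ t from by omega]
      · have hF : countWhileAdd (t - v).toNat v t x = false := by
          cases hb : countWhileAdd (t - v).toNat v t x with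
          | false => rfl
          | true => exact absurd (hA.mp hb).2 hd
        simp only [hvt, hF, Bool.false_eq_true]
        have : (decide (v ≠ t) && decide (PySem.Int.mod (t - v) x = 0)) = false := by
          simp only [Bool.and_eq_false_iff, decide_eq_false_iff_not]
          right; exact fun h => hd (hdvd.mp h)
        rw [this]; simp
  · have hgt : t < v := by omega
    have hA := countWhileSub_iff (v - t).toNat v t x hx (by omega)
    have hdvd : PySem.Int.mod (t - v) x = 0 ↔ x ∣ (t - v) :=
      PySem.Int.mod_eq_zero_iff_dvd _ _
    have hdd : x ∣ (v - t) ↔ x ∣ (t - v) := by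
      constructor <;> intro h <;> simpa using h.neg_right
    by_cases hd : x ∣ (v - t)
    · have hT : countWhileSub (v - t).toNat v t x = true := hA.mpr ⟨hgt, hd⟩
      simp [hvt, hT, hdvd.mpr (hdd.mp hd), show v ≠ t from by omega]
    · have hF : countWhileSub (v - t).toNat v t x = false := by
        cases hb : countWhileSub (v - t).toNat v t x with
        | false => rfl
        | true => exact absurd (hA.mp hb).2 hd
      simp only [if_neg hvt, hF, Bool.false_eq_true]
      have : (decide (v ≠ t) && decide (PySem.Int.mod (t - v) x = 0)) = false := by
        simp only [Bool.and_eq_false_iff, decide_eq_false_iff_not]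
        right; exact fun h => hd (hdd.mpr (hdvd.mp h))
      rw [this]; simp

-- Generalised fold invariant for A's accumulator.
theorem count_fold (a : List Int) (t x : Int) (hx : 0 < x) (c : Int) :
    a.foldl
      (fun c v =>
        if v ≤ t then
          (if countWhileAdd (t - v).toNat v t x then c + 1 else c)
        else
          (if countWhileSub (v - t).toNat v t x then c + 1 else c))
      c
    = c + ((a.filter (fun v => decide (v ≠ t) && decide (PySem.Int.mod (t - v) x = 0))).length : Int) := by
  induction a generalizing c with
  | nil => simp
  | cons v rest ih =>
    have h := elem_test_eq t x v hx
    simp only [List.foldl_cons, List.filter_cons]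
    have hf : (if v ≤ t then (if countWhileAdd (t - v).toNat v t x then c + 1 else c)
               else (if countWhileSub (v - t).toNat v t x then c + 1 else c))
        = c + (if (decide (v ≠ t) && decide (PySem.Int.mod (t - v) x = 0)) then (1 : Int) else 0) := by
      rw [← h]; split_ifs <;> ring
    rw [hf, ih]
    by_cases hb : (decide (v ≠ t) && decide (PySem.Int.mod (t - v) x = 0)) = true
    · rw [hb]
      simp only [if_pos rfl]
      push_cast [List.length_cons]; ring
    · rw [Bool.not_eq_true] at hb
      rw [hb]
      simp

-- ===== VERDICT (by name: the statement is the Claim_ definition above) =====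
theorem count_spec : Claim_equal_count := by
  intro a t x _ hpre
  unfold Spec_count count count_alt
  simpa using count_fold a t x hpre 0
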